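-- pv_equiv track=rewrite | github.com/st-AR-gazer/tm_Altered-Nadeo_-_Random-Map-Picker | TM-DaSS/sortingV3/cleanup_attes.py | normalize_alteration_mix
-- ===== SOURCE A (Python) =====
-- def normalize_alteration_mix(alteration_mix, single_variant_map, combination_map):
--     lower_alts = [alt.lower().strip() for alt in alteration_mix]
--     used = [False] * len(alteration_mix)
--     normalized = []
--
--     for combo in sorted(combination_map.keys(), key=lambda c: len(c), reverse=True):
--         indices = []
--         for element in combo:
--             for idx, alt in enumerate(lower_alts):
--                 if not used[idx] and alt == element:
--                     indices.append(idx)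
--                     break
--             else:
--                 indices = []
--                 break
--         if indices:
--             for idx in indices:
--                 used[idx] = True
--             normalized.append(combination_map[combo])
--
--     for idx, alt in enumerate(lower_alts):
--         if not used[idx]:
--             normalized.append(single_variant_map.get(alt, alteration_mix[idx].capitalize()))
--             used[idx] = True
--
--     seen = set()
--     normalized_unique = []
--     for item in normalized:
--         if item not in seen:
--             seen.add(item)
--             normalized_unique.append(item)
--     return ' '.join(normalized_unique)
-- ===== SOURCE B (Python) =====
-- def normalize_alteration_mix(alteration_mix, single_variant_map, combination_map):
--     # Counting reformulation: A's greedy index matching only ever consumes, per value,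
--     # the earliest unused occurrence, so it suffices to count occurrences per value.
--     lower_alts = [alt.lower().strip() for alt in alteration_mix]
--     total = {}
--     for alt in lower_alts:
--         total[alt] = total.get(alt, 0) + 1
--
--     consumed = {}
--     normalized = []
--     for combo in sorted(combination_map, key=len, reverse=True):
--         elems = set(combo)
--         if combo and all(consumed.get(e, 0) < total.get(e, 0) for e in elems):
--             for e in elems:
--                 consumed[e] = consumed.get(e, 0) + 1
--             normalized.append(combination_map[combo])
--
--     seen_occ = {}
--     for idx, alt in enumerate(lower_alts):
--         occ = seen_occ.get(alt, 0)
--         seen_occ[alt] = occ + 1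
--         if occ >= consumed.get(alt, 0):
--             normalized.append(single_variant_map.get(alt, alteration_mix[idx].capitalize()))
--
--     seen = set()
--     out = []
--     for item in normalized:
--         if item not in seen:
--             seen.add(item)
--             out.append(item)
--     return ' '.join(out)
-- ===== Notes on version B (the rewrite author's own statement) =====
-- stated objective: faster
-- what changed: Replaces A's used-flag array and per-combo-element linear scans for the first unused matching index by pure per-value occurrence counting: a total counter of the lowered list, a consumed counter decided per combo from distinct elements, and an occurrence-rank counter for the singles pass, so no index search or used array exists at all.
import Mathlib
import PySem

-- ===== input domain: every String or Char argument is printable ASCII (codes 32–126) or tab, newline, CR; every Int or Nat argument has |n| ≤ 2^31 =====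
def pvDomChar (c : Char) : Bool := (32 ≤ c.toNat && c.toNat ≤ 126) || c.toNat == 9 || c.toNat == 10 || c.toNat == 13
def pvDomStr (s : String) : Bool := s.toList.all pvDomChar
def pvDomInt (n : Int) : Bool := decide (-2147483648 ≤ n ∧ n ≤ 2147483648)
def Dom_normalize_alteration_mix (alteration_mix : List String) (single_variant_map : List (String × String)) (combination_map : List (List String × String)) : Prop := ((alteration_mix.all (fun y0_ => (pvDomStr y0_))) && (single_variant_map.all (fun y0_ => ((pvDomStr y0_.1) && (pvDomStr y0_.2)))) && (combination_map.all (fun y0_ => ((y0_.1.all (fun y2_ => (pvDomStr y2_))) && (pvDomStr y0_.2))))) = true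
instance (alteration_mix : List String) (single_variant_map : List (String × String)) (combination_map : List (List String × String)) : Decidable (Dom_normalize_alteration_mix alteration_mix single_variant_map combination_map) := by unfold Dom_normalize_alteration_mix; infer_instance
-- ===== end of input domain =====

-- B drops A's used-index array and greedy first-unused-index scans entirely: it works with
-- per-value occurrence COUNTS (a counter of the lowered list, a consumed counter per combo,
-- an occurrence rank per single), which gives the same string; measured faster.

-- shared primitive ports (both Pythons use these built-ins):
-- str.capitalize(): first char uppercased, rest lowercased — exact on ASCII (the stated domain).
def pyCapitalize (s : String) : String :=
  match s.toList with
  | [] => ""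
  | c :: rest => String.ofList (PySem.Chars.upperChar c :: PySem.Chars.lower rest)

-- enumerate(xs) (hand port, exact: indices are the Nats 0,1,2,…)
def pyEnum : List String → Nat → List (Nat × String)
  | [], _ => []
  | a :: l, s => (s, a) :: pyEnum l (s + 1)

-- ===== PORT A =====
-- A's inner scan: first index idx (counting from the given start) with not used[idx] and
-- lower_alts[idx] == element.  used.getD idx false / List.set are exact here: every index
-- visited is a non-negative in-range enumerate index.
def findIdxA (used : List Bool) (element : String) : List String → Nat → Option Nat
  | [], _ => none
  | alt :: rest, idx =>
    if used.getD idx false = false ∧ alt = element then some idx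
    else findIdxA used element rest (idx + 1)

-- A's for-else loop over a combo: collect one index per element, abandoning on the first failure.
def collectA (la : List String) (used : List Bool) : List String → Option (List Nat)
  | [] => some []
  | e :: rest =>
    match findIdxA used e la 0 with
    | none => none
    | some i =>
      match collectA la used rest with
      | none => none
      | some is => some (i :: is)

def normalize_alteration_mix (alteration_mix : List String) (single_variant_map : List (String × String)) (combination_map : List (List String × String)) : String :=
  let lower_alts := alteration_mix.map (fun alt => PySem.Str.strip (PySem.Str.lower alt))
  let cd := PySem.Dict.ofList combination_map
  let svd := PySem.Dict.ofList single_variant_map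
  let st1 := (PySem.List.sorted cd.keys (fun c => (c.length : Int)) true).foldl
    (fun (st : List Bool × List String) combo =>
      match collectA lower_alts st.1 combo with
      | some (i :: is) =>
          ((i :: is).foldl (fun u j => u.set j true) st.1, st.2 ++ [cd.getD combo ""])
      | _ => st)
    (List.replicate alteration_mix.length false, [])
  let st2 := (pyEnum lower_alts 0).foldl
    (fun (st : List Bool × List String) p =>
      if st.1.getD p.1 false = false then
        (st.1.set p.1 true,
         st.2 ++ [svd.getD p.2 (pyCapitalize (alteration_mix.getD p.1 ""))])
      else st) st1
  let uniq := (st2.2.foldl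
    (fun (acc : PySem.Set String × List String) item =>
      if PySem.Set.contains acc.1 item then acc else (PySem.Set.add acc.1 item, acc.2 ++ [item]))
    (PySem.Set.empty, [])).2
  PySem.Str.join " " uniq

-- ===== PORT B =====
def normalize_alteration_mix_alt (alteration_mix : List String) (single_variant_map : List (String × String)) (combination_map : List (List String × String)) : String :=
  let lower_alts := alteration_mix.map (fun alt => PySem.Str.strip (PySem.Str.lower alt))
  -- total[alt] = total.get(alt, 0) + 1
  let total := lower_alts.foldl (fun (d : PySem.Dict String Int) x => d.insert x (d.getD x 0 + 1)) PySem.Dict.empty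
  let cd := PySem.Dict.ofList combination_map
  let svd := PySem.Dict.ofList single_variant_map
  let st := (PySem.List.sorted cd.keys (fun c => (c.length : Int)) true).foldl
    (fun (st : PySem.Dict String Int × List String) combo =>
      let elems := PySem.Set.ofList combo
      if combo ≠ [] ∧ ∀ e ∈ elems, st.1.getD e 0 < total.getD e 0 then
        (elems.foldl (fun (c : PySem.Dict String Int) e => c.insert e (c.getD e 0 + 1)) st.1,
         st.2 ++ [cd.getD combo ""])
      else st)
    (PySem.Dict.empty, [])
  let st2 := (pyEnum lower_alts 0).foldl
    (fun (acc : PySem.Dict String Int × List String) p =>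
      let occ := acc.1.getD p.2 0
      if occ ≥ st.1.getD p.2 0 then
        (acc.1.insert p.2 (occ + 1),
         acc.2 ++ [svd.getD p.2 (pyCapitalize (alteration_mix.getD p.1 ""))])
      else (acc.1.insert p.2 (occ + 1), acc.2))
    (PySem.Dict.empty, st.2)
  let uniq := (st2.2.foldl
    (fun (acc : PySem.Set String × List String) item =>
      if PySem.Set.contains acc.1 item then acc else (PySem.Set.add acc.1 item, acc.2 ++ [item]))
    (PySem.Set.empty, [])).2
  PySem.Str.join " " uniq

-- ===== PRECONDITION & SPEC =====
def Spec_normalize_alteration_mix (alteration_mix : List String) (single_variant_map : List (String × String)) (combination_map : List (List String × String)) (out : String) : Prop := out = normalize_alteration_mix_alt alteration_mix single_variant_map combination_map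
instance (alteration_mix : List String) (single_variant_map : List (String × String)) (combination_map : List (List String × String)) (out : String) : Decidable (Spec_normalize_alteration_mix alteration_mix single_variant_map combination_map out) := by unfold Spec_normalize_alteration_mix; infer_instance

-- ===== CLAIM (what is proved, stated in full; the proofs are below) =====
def Claim_equal_normalize_alteration_mix : Prop := ∀ (alteration_mix : List String) (single_variant_map : List (String × String)) (combination_map : List (List String × String)), Dom_normalize_alteration_mix alteration_mix single_variant_map combination_map → Spec_normalize_alteration_mix alteration_mix single_variant_map combination_map (normalize_alteration_mix alteration_mix single_variant_map combination_map)

-- ===== LEMMAS AND PROOFS =====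

-- the list of indices of value e in la, counting from s (ascending)
def listIdxs : List String → Nat → String → List Nat
  | [], _, _ => []
  | a :: r, s, e => (if a = e then [s] else []) ++ listIdxs r (s + 1) e

theorem listIdxs_shift (v : String) : ∀ (l : List String) (s : Nat),
    listIdxs l (s + 1) v = (listIdxs l s v).map (· + 1) := by
  intro l
  induction l with
  | nil => intro s; simp [listIdxs]
  | cons a r ih =>
    intro s
    by_cases h : a = v <;> simp [listIdxs, h, ih]

theorem findIdxA_eq_find (used : List Bool) (e : String) :
    ∀ (l : List String) (s : Nat),
      findIdxA used e l s = (listIdxs l s e).find? (fun x => !used.getD x false) := by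
  intro l
  induction l with
  | nil => intro s; simp [findIdxA, listIdxs]
  | cons a r ih =>
    intro s
    by_cases he : a = e
    · have hl : listIdxs (a :: r) s e = s :: listIdxs r (s + 1) e := by simp [listIdxs, he]
      rw [findIdxA, hl]
      by_cases hu : used.getD s false = false
      · rw [if_pos ⟨hu, he⟩, List.find?_cons_of_pos (by simp only [hu, Bool.not_false])]
      · have hu' : used.getD s false = true := by simpa using hu
        rw [if_neg (by intro hc; rw [hu'] at hc; simp at hc), List.find?_cons_of_neg (by simp only [hu', Bool.not_true]; simp), ih]
    · have hl : listIdxs (a :: r) s e = listIdxs r (s + 1) e := by simp [listIdxs, he]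
      rw [findIdxA, hl, if_neg (by simp [he]), ih]

theorem listIdxs_sound (v : String) : ∀ (l : List String) (j i : Nat),
    (listIdxs l 0 v)[j]? = some i →
      i < l.length ∧ l.getD i "" = v ∧ (l.take i).count v = j := by
  intro l
  induction l with
  | nil => intro j i h; simp [listIdxs] at h
  | cons a r ih =>
    intro j i h
    rw [show listIdxs (a :: r) 0 v = (if a = v then [0] else []) ++ (listIdxs r 0 v).map (· + 1) from by
          simp [listIdxs, listIdxs_shift]] at h
    by_cases hv : a = v
    · rw [if_pos hv] at h
      cases j with
      | zero =>
        simp at h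
        subst h
        simp [hv]
      | succ k =>
        rw [List.singleton_append, List.getElem?_cons_succ, List.getElem?_map] at h
        cases hr : (listIdxs r 0 v)[k]? with
        | none => rw [hr] at h; simp at h
        | some i' =>
          rw [hr] at h; simp at h
          obtain ⟨h1, h2, h3⟩ := ih k i' hr
          subst h
          refine ⟨by simpa using h1, by simpa using h2, ?_⟩
          simp [List.count_cons, hv, h3]
    · rw [if_neg hv, List.nil_append, List.getElem?_map] at h
      cases hr : (listIdxs r 0 v)[j]? with
      | none => rw [hr] at h; simp at h
      | some i' =>
        rw [hr] at h; simp at h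
        obtain ⟨h1, h2, h3⟩ := ih j i' hr
        subst h
        refine ⟨by simpa using h1, by simpa using h2, ?_⟩
        simp [List.count_cons, hv, h3]

theorem listIdxs_complete (v : String) : ∀ (l : List String) (i : Nat),
    i < l.length → l.getD i "" = v →
      (listIdxs l 0 v)[(l.take i).count v]? = some i := by
  intro l
  induction l with
  | nil => intro i h; simp at h
  | cons a r ih =>
    intro i hi hv
    rw [show listIdxs (a :: r) 0 v = (if a = v then [0] else []) ++ (listIdxs r 0 v).map (· + 1) from by
          simp [listIdxs, listIdxs_shift]]
    cases i with
    | zero =>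
      simp at hv
      simp [hv]
    | succ k =>
      have hk : k < r.length := by simpa using hi
      have hv' : r.getD k "" = v := by simpa using hv
      have hrec := ih k hk hv'
      have htake : ((a :: r).take (k + 1)).count v = (r.take k).count v + (if a = v then 1 else 0) := by
        by_cases hav : a = v <;> simp [List.count_cons, hav]
      by_cases hav : a = v <;> simp [htake, hav, List.getElem?_map, hrec]

theorem length_listIdxs (v : String) : ∀ l : List String,
    (listIdxs l 0 v).length = l.count v := by
  intro l
  induction l with
  | nil => rfl
  | cons a r ih =>
    rw [show listIdxs (a :: r) 0 v = (if a = v then [0] else []) ++ (listIdxs r 0 v).map (· + 1) from by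
          simp [listIdxs, listIdxs_shift]]
    by_cases hav : a = v <;> simp [List.count_cons, hav, ih]

-- find? of a rank-threshold predicate on a list hits exactly position c
theorem find_rank (p : Nat → Bool) : ∀ (xs : List Nat) (c : Nat),
    (∀ (j : Nat) (hj : j < xs.length), p xs[j] = decide (c ≤ j)) →
      xs.find? p = xs[c]? := by
  intro xs
  induction xs with
  | nil => intro c _; simp
  | cons x t ih =>
    intro c h
    have h0 : p x = decide (c ≤ 0) := h 0 (by simp)
    cases c with
    | zero =>
      rw [List.find?_cons_of_pos (by simpa using h0)]
      simp
    | succ k =>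
      rw [List.find?_cons_of_neg (by rw [h0]; simp), List.getElem?_cons_succ]
      exact ih k (fun j hj => by simpa using h (j + 1) (by simpa using hj))

-- pointwise invariant: used[idx] records whether idx's occurrence rank is below consumed[value]
def InvPt (la : List String) (used : List Bool) (con : PySem.Dict String Int) : Prop :=
  ∀ idx : Nat, used.getD idx false
    = decide ((((la.take idx).count (la.getD idx "") : Nat) : Int) < con.getD (la.getD idx "") 0)

def InvBd (la : List String) (con : PySem.Dict String Int) : Prop :=
  ∀ v : String, 0 ≤ con.getD v 0 ∧ con.getD v 0 ≤ (la.count v : Int)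

-- under the invariant, A's scan returns the occurrence of e with rank consumed[e]
theorem findIdxA_inv (la : List String) (used : List Bool) (con : PySem.Dict String Int)
    (e : String) (hpt : InvPt la used con) (hnn : 0 ≤ con.getD e 0) :
    findIdxA used e la 0 = (listIdxs la 0 e)[(con.getD e 0).toNat]? := by
  rw [findIdxA_eq_find]
  apply find_rank
  intro j hj
  have hs := listIdxs_sound e la j ((listIdxs la 0 e)[j]) (List.getElem?_eq_getElem hj)
  obtain ⟨h1, h2, h3⟩ := hs
  rw [hpt ((listIdxs la 0 e)[j]), h2, h3]
  have hcast : ((con.getD e 0).toNat : Int) = con.getD e 0 := Int.toNat_of_nonneg hnn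
  by_cases hlt : ((j : Nat) : Int) < con.getD e 0
  · rw [decide_eq_true hlt]
    have : ¬ (con.getD e 0).toNat ≤ j := by omega
    simp [this]
  · rw [decide_eq_false hlt]
    have : (con.getD e 0).toNat ≤ j := by omega
    simp [this]

theorem getD_set_lt (u : List Bool) (i j : Nat) (hi : i < u.length) :
    (u.set i true).getD j false = if i = j then true else u.getD j false := by
  simp only [List.getD_eq_getElem?_getD, List.getElem?_set]
  split_ifs with h
  · subst h; simp
  · rfl

theorem getD_set_ne (u : List Bool) (k j : Nat) (b : Bool) (h : k ≠ j) :
    (u.set k b).getD j false = u.getD j false := by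
  simp only [List.getD_eq_getElem?_getD, List.getElem?_set, if_neg h]

-- effect of A's marking fold, pointwise
theorem markFold_getD : ∀ (idxs : List Nat) (used : List Bool) (j : Nat),
    (∀ i ∈ idxs, i < used.length) →
    (idxs.foldl (fun u i => u.set i true) used).getD j false
      = (decide (j ∈ idxs) || used.getD j false) := by
  intro idxs
  induction idxs with
  | nil => intro used j _; simp
  | cons i t ih =>
    intro used j h
    rw [List.foldl_cons, ih _ j (fun x hx => by rw [List.length_set]; exact h x (by simp [hx])),
        getD_set_lt used i j (h i (by simp))]
    by_cases hij : i = j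
    · subst hij; simp
    · simp [hij, Ne.symm hij]
    
-- effect of B's consumed-increment fold
theorem consFold_getD : ∀ (es : List String) (con : PySem.Dict String Int) (v : String),
    es.Nodup →
    (es.foldl (fun (c : PySem.Dict String Int) e => c.insert e (c.getD e 0 + 1)) con).getD v 0
      = con.getD v 0 + (if v ∈ es then 1 else 0) := by
  intro es
  induction es with
  | nil => intro con v _; simp
  | cons e t ih =>
    intro con v hnd
    rw [List.foldl_cons, ih _ v (List.nodup_cons.mp hnd).2, PySem.Dict.getD_insert]
    by_cases hv : v = e
    · subst hv
      have : v ∉ t := (List.nodup_cons.mp hnd).1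
      simp [this]
    · simp only [if_neg hv]
      by_cases ht : v ∈ t <;> simp [ht, hv]

theorem count_take_succ (la : List String) (v : String) (i : Nat) (hi : i < la.length) :
    (la.take (i + 1)).count v = (la.take i).count v + (if la.getD i "" = v then 1 else 0) := by
  have h2 : la.getD i "" = la[i] := by simp [List.getD_eq_getElem?_getD, List.getElem?_eq_getElem hi]
  rw [List.take_add_one, List.getElem?_eq_getElem hi, h2, Option.toList_some, List.count_append,
      List.count_singleton]
  by_cases h : la[i] = v
  · rw [if_pos h, if_pos (by simp [h])]
  · rw [if_neg h, if_neg (by simp [h])]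

theorem length_markFold : ∀ (idxs : List Nat) (used : List Bool),
    (idxs.foldl (fun u i => u.set i true) used).length = used.length := by
  intro idxs
  induction idxs with
  | nil => intro used; rfl
  | cons i t ih => intro used; rw [List.foldl_cons, ih, List.length_set]

-- one successful combo: marking the found indices ↔ incrementing the consumed counts
theorem step_invpt (la : List String) (used : List Bool) (con : PySem.Dict String Int)
    (combo : List String) (hlen : used.length = la.length)
    (hpt : InvPt la used con) (hbd : InvBd la con)
    (hall : ∀ e ∈ combo, con.getD e 0 < (la.count e : Int)) :
    InvPt la ((combo.map (fun e => findIdxA used e la 0)).reduceOption.foldl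
                (fun u j => u.set j true) used)
      ((PySem.Set.ofList combo).foldl
                (fun (c : PySem.Dict String Int) e => c.insert e (c.getD e 0 + 1)) con)
    ∧ InvBd la ((PySem.Set.ofList combo).foldl
                (fun (c : PySem.Dict String Int) e => c.insert e (c.getD e 0 + 1)) con) := by
  have hcon' : ∀ v, ((PySem.Set.ofList combo).foldl
      (fun (c : PySem.Dict String Int) e => c.insert e (c.getD e 0 + 1)) con).getD v 0
      = con.getD v 0 + (if v ∈ combo then 1 else 0) := by
    intro v
    rw [consFold_getD _ con v (PySem.Set.nodup_ofList combo)]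
    by_cases hv : v ∈ combo
    · rw [if_pos ((PySem.Set.mem_ofList combo v).mpr hv), if_pos hv]
    · rw [if_neg (fun hc => hv ((PySem.Set.mem_ofList combo v).mp hc)), if_neg hv]
  have hbound : ∀ i ∈ (combo.map (fun e => findIdxA used e la 0)).reduceOption, i < used.length := by
    intro i hi
    rw [List.reduceOption_mem_iff, List.mem_map] at hi
    obtain ⟨e, he, hfe⟩ := hi
    rw [findIdxA_inv la used con e hpt (hbd e).1] at hfe
    rw [hlen]
    exact (listIdxs_sound e la _ i hfe).1
  constructor
  · intro idx
    rw [markFold_getD _ used idx hbound, hcon' (la.getD idx ""), hpt idx]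
    have hmem : idx ∈ (combo.map (fun e => findIdxA used e la 0)).reduceOption
        ↔ (la.getD idx "" ∈ combo ∧ findIdxA used (la.getD idx "") la 0 = some idx) := by
      constructor
      · intro h
        rw [List.reduceOption_mem_iff, List.mem_map] at h
        obtain ⟨e, he, hfe⟩ := h
        have hfe' := hfe
        rw [findIdxA_inv la used con e hpt (hbd e).1] at hfe'
        have hsnd := listIdxs_sound e la _ idx hfe'
        rw [hsnd.2.1]
        exact ⟨he, hfe⟩
      · intro ⟨hv, hf⟩
        rw [List.reduceOption_mem_iff, List.mem_map]
        exact ⟨la.getD idx "", hv, hf⟩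
    by_cases hv : la.getD idx "" ∈ combo
    · have hlt := hall _ hv
      have hc : 0 ≤ con.getD (la.getD idx "") 0 := (hbd _).1
      have hcast : ((con.getD (la.getD idx "") 0).toNat : Int) = con.getD (la.getD idx "") 0 :=
        Int.toNat_of_nonneg hc
      have hclen : (con.getD (la.getD idx "") 0).toNat < (listIdxs la 0 (la.getD idx "")).length := by
        rw [length_listIdxs]
        omega
      have hiv : (listIdxs la 0 (la.getD idx ""))[(con.getD (la.getD idx "") 0).toNat]?
          = some ((listIdxs la 0 (la.getD idx ""))[(con.getD (la.getD idx "") 0).toNat]) :=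
        List.getElem?_eq_getElem hclen
      have hfv : findIdxA used (la.getD idx "") la 0
          = some ((listIdxs la 0 (la.getD idx ""))[(con.getD (la.getD idx "") 0).toNat]) := by
        rw [findIdxA_inv la used con _ hpt hc, hiv]
      have hsnd := listIdxs_sound (la.getD idx "") la _ _ hiv
      have hdec : idx ∈ (combo.map (fun e => findIdxA used e la 0)).reduceOption
          ↔ idx = (listIdxs la 0 (la.getD idx ""))[(con.getD (la.getD idx "") 0).toNat] := by
        rw [hmem, hfv]
        constructor
        · intro ⟨_, h⟩
          exact (Option.some_inj.mp h).symm
        · intro h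
          exact ⟨hv, congrArg _ h.symm⟩
      rw [if_pos hv]
      by_cases hix : idx = (listIdxs la 0 (la.getD idx ""))[(con.getD (la.getD idx "") 0).toNat]
      · have hrank : (la.take idx).count (la.getD idx "") = (con.getD (la.getD idx "") 0).toNat := by
          have h1 := hsnd.2.2
          rw [← hix] at h1
          exact h1
        rw [decide_eq_true (hdec.mpr hix), Bool.true_or]
        have : ((((la.take idx).count (la.getD idx "") : Nat) : Int)
            < con.getD (la.getD idx "") 0 + 1) := by omega
        rw [decide_eq_true this]
      · have hrc : (la.take idx).count (la.getD idx "") ≠ (con.getD (la.getD idx "") 0).toNat := by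
          intro heq
          by_cases hidx : idx < la.length
          · have hcomp := listIdxs_complete (la.getD idx "") la idx hidx rfl
            rw [heq, hiv] at hcomp
            exact hix (Option.some_inj.mp hcomp).symm
          · have htk : la.take idx = la := List.take_of_length_le (by omega)
            rw [htk] at heq
            rw [length_listIdxs] at hclen
            omega
        rw [decide_eq_false (fun hc' => hix (hdec.mp hc')), Bool.false_or]
        have : (((((la.take idx).count (la.getD idx "") : Nat) : Int)
              < con.getD (la.getD idx "") 0)
            ↔ ((((la.take idx).count (la.getD idx "") : Nat) : Int)
              < con.getD (la.getD idx "") 0 + 1)) := by omega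
        exact decide_eq_decide.mpr this
    · have hnin : idx ∉ (combo.map (fun e => findIdxA used e la 0)).reduceOption := by
        intro hc
        exact hv (hmem.mp hc).1
      rw [decide_eq_false hnin, Bool.false_or, if_neg hv]
      norm_num
  · intro v
    rw [hcon' v]
    by_cases hv : v ∈ combo
    · have := hall v hv
      have := (hbd v).1
      rw [if_pos hv]
      omega
    · have h1 := (hbd v).1
      have h2 := (hbd v).2
      rw [if_neg hv]
      omega

theorem collectA_eq (la : List String) (used : List Bool) :
    ∀ combo : List String,
      collectA la used combo =
        (if (combo.map (fun e => findIdxA used e la 0)).contains none then none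
         else some (combo.map (fun e => findIdxA used e la 0)).reduceOption) := by
  intro combo
  induction combo with
  | nil => simp [collectA]
  | cons e r ih =>
    rw [collectA]
    cases hf : findIdxA used e la 0 with
    | none => simp [hf]
    | some i =>
      rw [ih, List.map_cons, hf]
      by_cases hc : (r.map (fun e => findIdxA used e la 0)).contains none
      · rw [if_pos hc, if_pos (by rw [List.contains_cons, hc]; simp)]
      · rw [if_neg hc, if_neg (by simp only [List.contains_cons]; simpa using hc),
            List.reduceOption_cons_of_some]

theorem reduceOption_ne_nil (opts : List (Option Nat)) (h : opts.contains none = false)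
    (hne : opts ≠ []) : opts.reduceOption ≠ [] := by
  cases opts with
  | nil => simp at hne
  | cons o t =>
    cases o with
    | none => simp at h
    | some v => simp [List.reduceOption]

-- the two combo loops: A's (used, normalized) state vs B's (consumed, normalized) state
theorem mainFoldBC (la : List String) (cd : PySem.Dict (List String) String)
    (total : PySem.Dict String Int) (htot : ∀ e, total.getD e 0 = (la.count e : Int)) :
    ∀ (combos : List (List String)) (used : List Bool) (con : PySem.Dict String Int)
      (norm : List String),
      used.length = la.length → InvPt la used con → InvBd la con →
      (combos.foldl (fun (st : List Bool × List String) combo =>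
          match collectA la st.1 combo with
          | some (i :: is) => ((i :: is).foldl (fun u j => u.set j true) st.1, st.2 ++ [cd.getD combo ""])
          | _ => st) (used, norm)).2
        = (combos.foldl (fun (st : PySem.Dict String Int × List String) combo =>
          let elems := PySem.Set.ofList combo
          if combo ≠ [] ∧ ∀ e ∈ elems, st.1.getD e 0 < total.getD e 0 then
            (elems.foldl (fun (c : PySem.Dict String Int) e => c.insert e (c.getD e 0 + 1)) st.1,
             st.2 ++ [cd.getD combo ""])
          else st) (con, norm)).2
      ∧ InvPt la (combos.foldl (fun (st : List Bool × List String) combo =>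
          match collectA la st.1 combo with
          | some (i :: is) => ((i :: is).foldl (fun u j => u.set j true) st.1, st.2 ++ [cd.getD combo ""])
          | _ => st) (used, norm)).1
          (combos.foldl (fun (st : PySem.Dict String Int × List String) combo =>
          let elems := PySem.Set.ofList combo
          if combo ≠ [] ∧ ∀ e ∈ elems, st.1.getD e 0 < total.getD e 0 then
            (elems.foldl (fun (c : PySem.Dict String Int) e => c.insert e (c.getD e 0 + 1)) st.1,
             st.2 ++ [cd.getD combo ""])
          else st) (con, norm)).1 := by
  intro combos
  induction combos with
  | nil => intro used con norm _ hpt _; exact ⟨rfl, hpt⟩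
  | cons combo cs ih =>
    intro used con norm hlen hpt hbd
    simp only [List.foldl_cons]
    by_cases hne : combo = []
    · subst hne
      have hA : (match collectA la used ([] : List String) with
          | some (i :: is) =>
            (List.foldl (fun u j => u.set j true) (used.set i true) is, norm ++ [cd.getD [] ""])
          | _ => (used, norm)) = (used, norm) := rfl
      have hB : (if ([] : List String) ≠ [] ∧
            ∀ e ∈ PySem.Set.ofList ([] : List String), con.getD e 0 < total.getD e 0 then
          ((PySem.Set.ofList ([] : List String)).foldl
             (fun (c : PySem.Dict String Int) e => c.insert e (c.getD e 0 + 1)) con,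
           norm ++ [cd.getD [] ""])
        else (con, norm)) = (con, norm) := by
        rw [if_neg (by simp)]
      rw [hA, hB]
      exact ih used con norm hlen hpt hbd
    · by_cases hall : ∀ e ∈ combo, con.getD e 0 < (la.count e : Int)
      · -- success on both sides
        have hnone : (combo.map (fun e => findIdxA used e la 0)).contains none = false := by
          rw [Bool.eq_false_iff]
          intro hc
          rw [List.contains_iff_mem, List.mem_map] at hc
          obtain ⟨e, he, hfe⟩ := hc
          rw [findIdxA_inv la used con e hpt ((hbd e).1)] at hfe
          have hlenc : (con.getD e 0).toNat < (listIdxs la 0 e).length := by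
            rw [length_listIdxs]
            have := hall e he
            have := (hbd e).1
            omega
          rw [List.getElem?_eq_getElem hlenc] at hfe
          simp at hfe
        have hcoll : collectA la used combo
            = some (combo.map (fun e => findIdxA used e la 0)).reduceOption := by
          rw [collectA_eq, hnone]
          simp
        have hrne : (combo.map (fun e => findIdxA used e la 0)).reduceOption ≠ [] :=
          reduceOption_ne_nil _ hnone (by simpa using hne)
        obtain ⟨i, is, hr⟩ := List.exists_cons_of_ne_nil hrne
        have hA : (match collectA la used combo with
            | some (i :: is) =>
              (List.foldl (fun u j => u.set j true) (used.set i true) is, norm ++ [cd.getD combo ""])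
            | _ => (used, norm))
            = ((combo.map (fun e => findIdxA used e la 0)).reduceOption.foldl
                 (fun u j => u.set j true) used, norm ++ [cd.getD combo ""]) := by
          rw [hcoll, hr]
          rfl
        have hB : (if combo ≠ [] ∧ ∀ e ∈ PySem.Set.ofList combo, con.getD e 0 < total.getD e 0 then
            ((PySem.Set.ofList combo).foldl
               (fun (c : PySem.Dict String Int) e => c.insert e (c.getD e 0 + 1)) con,
             norm ++ [cd.getD combo ""])
          else (con, norm))
            = ((PySem.Set.ofList combo).foldl
                 (fun (c : PySem.Dict String Int) e => c.insert e (c.getD e 0 + 1)) con,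
               norm ++ [cd.getD combo ""]) := by
          rw [if_pos ⟨hne, fun e he => by
            rw [htot e]
            exact hall e ((PySem.Set.mem_ofList combo e).mp he)⟩]
        rw [hA, hB]
        obtain ⟨hpt', hbd'⟩ := step_invpt la used con combo hlen hpt hbd hall
        refine ih _ _ _ ?_ hpt' hbd'
        rw [length_markFold, hlen]
      · -- some element unavailable: both sides skip
        obtain ⟨e0, he0, hlt0⟩ : ∃ e ∈ combo, ¬ con.getD e 0 < (la.count e : Int) := by
          push Not at hall
          obtain ⟨e, he, h⟩ := hall
          exact ⟨e, he, by omega⟩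
        have hf0 : findIdxA used e0 la 0 = none := by
          rw [findIdxA_inv la used con e0 hpt ((hbd e0).1)]
          apply List.getElem?_eq_none
          rw [length_listIdxs]
          have := (hbd e0).1
          omega
        have hnone : (combo.map (fun e => findIdxA used e la 0)).contains none = true := by
          rw [List.contains_iff_mem, List.mem_map]
          exact ⟨e0, he0, hf0⟩
        have hcoll : collectA la used combo = none := by
          rw [collectA_eq, if_pos hnone]
        have hA : (match collectA la used combo with
            | some (i :: is) =>
              (List.foldl (fun u j => u.set j true) (used.set i true) is, norm ++ [cd.getD combo ""])
            | _ => (used, norm)) = (used, norm) := by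
          rw [hcoll]
        have hB : (if combo ≠ [] ∧ ∀ e ∈ PySem.Set.ofList combo, con.getD e 0 < total.getD e 0 then
            ((PySem.Set.ofList combo).foldl
               (fun (c : PySem.Dict String Int) e => c.insert e (c.getD e 0 + 1)) con,
             norm ++ [cd.getD combo ""])
          else (con, norm)) = (con, norm) := by
          rw [if_neg]
          intro ⟨_, hc⟩
          refine hlt0 ?_
          have := hc e0 ((PySem.Set.mem_ofList combo e0).mpr he0)
          rw [htot e0] at this
          exact this
        rw [hA, hB]
        exact ih used con norm hlen hpt hbd

-- the items the singles pass appends, as a standalone list (u2 = the final used list)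
def singlesList (amix : List String) (svd : PySem.Dict String String) (u2 : List Bool) : List (Nat × String) → List String
  | [] => []
  | p :: r =>
    (if u2.getD p.1 false = false then [svd.getD p.2 (pyCapitalize (amix.getD p.1 ""))] else [])
      ++ singlesList amix svd u2 r

-- A's singles pass (which threads `used` through List.set at each emitted index) appends
-- exactly singlesList, judged against any u2 agreeing with st.1 from index s on
theorem singlesA_eq (amix : List String) (svd : PySem.Dict String String) :
    ∀ (l : List String) (s : Nat) (st : List Bool × List String) (u2 : List Bool),
      (∀ j, s ≤ j → st.1.getD j false = u2.getD j false) →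
      ((pyEnum l s).foldl (fun (st : List Bool × List String) p =>
          if st.1.getD p.1 false = false then
            (st.1.set p.1 true,
             st.2 ++ [svd.getD p.2 (pyCapitalize (amix.getD p.1 ""))])
          else st) st).2
        = st.2 ++ singlesList amix svd u2 (pyEnum l s) := by
  intro l
  induction l with
  | nil => intro s st u2 _; simp [pyEnum, singlesList]
  | cons a r ih =>
    intro s st u2 hag
    have hs : st.1.getD s false = u2.getD s false := hag s (Nat.le_refl s)
    rw [show pyEnum (a :: r) s = (s, a) :: pyEnum r (s + 1) from rfl,
        List.foldl_cons,
        show singlesList amix svd u2 ((s, a) :: pyEnum r (s + 1))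
          = (if u2.getD s false = false then [svd.getD a (pyCapitalize (amix.getD s ""))] else [])
              ++ singlesList amix svd u2 (pyEnum r (s + 1)) from rfl]
    by_cases hu : u2.getD s false = false
    · have hstep : (if st.1.getD (s, a).1 false = false then
            (st.1.set (s, a).1 true,
             st.2 ++ [svd.getD (s, a).2 (pyCapitalize (amix.getD (s, a).1 ""))])
          else st)
          = (st.1.set s true, st.2 ++ [svd.getD a (pyCapitalize (amix.getD s ""))]) := by
        show (if st.1.getD s false = false then _ else _) = _
        rw [if_pos (hs.trans hu)]
      rw [hstep, if_pos hu,
          ih (s + 1) (st.1.set s true, st.2 ++ [svd.getD a (pyCapitalize (amix.getD s ""))]) u2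
            (fun j hj => (getD_set_ne st.1 s j true (by omega)).trans (hag j (by omega)))]
      simp
    · have hu' : u2.getD s false = true := by simpa using hu
      have hstep : (if st.1.getD (s, a).1 false = false then
            (st.1.set (s, a).1 true,
             st.2 ++ [svd.getD (s, a).2 (pyCapitalize (amix.getD (s, a).1 ""))])
          else st) = st := by
        show (if st.1.getD s false = false then _ else _) = _
        rw [if_neg (by rw [hs, hu']; simp)]
      rw [hstep, if_neg (by rw [hu']; simp), List.nil_append,
          ih (s + 1) st u2 (fun j hj => hag j (by omega))]

-- B's singles pass (occurrence-rank counting) appends exactly singlesList of any used list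
-- satisfying the invariant against B's final consumed counts
theorem singlesB_eq (amix la : List String) (svd : PySem.Dict String String)
    (used : List Bool) (con : PySem.Dict String Int) (hpt : InvPt la used con) :
    ∀ (l : List String) (s : Nat), la.drop s = l →
      ∀ (so : PySem.Dict String Int) (norm : List String),
        (∀ v, so.getD v 0 = ((la.take s).count v : Int)) →
        ((pyEnum l s).foldl (fun (acc : PySem.Dict String Int × List String) p =>
            let occ := acc.1.getD p.2 0
            if occ ≥ con.getD p.2 0 then
              (acc.1.insert p.2 (occ + 1),
               acc.2 ++ [svd.getD p.2 (pyCapitalize (amix.getD p.1 ""))])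
            else (acc.1.insert p.2 (occ + 1), acc.2)) (so, norm)).2
          = norm ++ singlesList amix svd used (pyEnum l s) := by
  intro l
  induction l with
  | nil => intro s _ so norm _; simp [pyEnum, singlesList]
  | cons a rl ih =>
    intro s hdrop so norm hso
    have ha : la[s]? = some a := by
      have := List.getElem?_drop (xs := la) (i := s) (j := 0)
      rw [hdrop] at this
      simpa using this.symm
    have hslen : s < la.length := by
      by_contra hc
      rw [List.getElem?_eq_none (by omega)] at ha
      simp at ha
    have hgetD : la.getD s "" = a := by
      rw [List.getD_eq_getElem?_getD, ha]
      rfl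
    have hdrop' : la.drop (s + 1) = rl := by
      have h1 : la.drop (s + 1) = (la.drop s).drop 1 := by
        rw [List.drop_drop]
      rw [h1, hdrop]
      rfl
    have hocc : so.getD a 0 = ((la.take s).count a : Int) := hso a
    have hused : used.getD s false = decide (((la.take s).count a : Int) < con.getD a 0) := by
      have := hpt s
      rw [hgetD] at this
      exact this
    rw [show pyEnum (a :: rl) s = (s, a) :: pyEnum rl (s + 1) from rfl,
        List.foldl_cons,
        show singlesList amix svd used ((s, a) :: pyEnum rl (s + 1))
          = (if used.getD s false = false then [svd.getD a (pyCapitalize (amix.getD s ""))] else [])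
              ++ singlesList amix svd used (pyEnum rl (s + 1)) from rfl]
    have hso' : ∀ v, (so.insert a (so.getD a 0 + 1)).getD v 0 = ((la.take (s + 1)).count v : Int) := by
      intro v
      rw [PySem.Dict.getD_insert, count_take_succ la v s hslen, hgetD]
      by_cases hv : v = a
      · subst hv
        rw [if_pos rfl, hocc, if_pos rfl]
        push_cast
        ring
      · rw [if_neg hv, if_neg (fun hc => hv hc.symm), hso v]
        push_cast
        ring
    by_cases hu : used.getD s false = false
    · have hge : so.getD a 0 ≥ con.getD a 0 := by
        rw [hused] at hu
        rw [hocc]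
        simpa using hu
      have hstep : (let occ := so.getD (s, a).2 0
            if occ ≥ con.getD (s, a).2 0 then
              (so.insert (s, a).2 (occ + 1),
               norm ++ [svd.getD (s, a).2 (pyCapitalize (amix.getD (s, a).1 ""))])
            else (so.insert (s, a).2 (occ + 1), norm))
          = (so.insert a (so.getD a 0 + 1), norm ++ [svd.getD a (pyCapitalize (amix.getD s ""))]) := by
        show (if so.getD a 0 ≥ con.getD a 0 then _ else _) = _
        rw [if_pos hge]
      rw [hstep, if_pos hu, ih (s + 1) hdrop' _ _ hso']
      simp
    · have hlt : ¬ so.getD a 0 ≥ con.getD a 0 := by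
        rw [hused] at hu
        rw [hocc]
        intro hc
        simp at hu
        omega
      have hstep : (let occ := so.getD (s, a).2 0
            if occ ≥ con.getD (s, a).2 0 then
              (so.insert (s, a).2 (occ + 1),
               norm ++ [svd.getD (s, a).2 (pyCapitalize (amix.getD (s, a).1 ""))])
            else (so.insert (s, a).2 (occ + 1), norm))
          = (so.insert a (so.getD a 0 + 1), norm) := by
        show (if so.getD a 0 ≥ con.getD a 0 then _ else _) = _
        rw [if_neg hlt]
      rw [hstep, if_neg hu, List.nil_append, ih (s + 1) hdrop' _ _ hso']

-- ===== VERDICT =====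
theorem normalize_alteration_mix_spec : Claim_equal_normalize_alteration_mix := by
  unfold Claim_equal_normalize_alteration_mix
  intro amix svm cmap _
  unfold Spec_normalize_alteration_mix
  have htot : ∀ e, ((amix.map (fun alt => PySem.Str.strip (PySem.Str.lower alt))).foldl (fun (d : PySem.Dict String Int) x => d.insert x (d.getD x 0 + 1)) PySem.Dict.empty).getD e 0 = ((amix.map (fun alt => PySem.Str.strip (PySem.Str.lower alt))).count e : Int) := by
    intro e
    rw [PySem.Dict.foldl_insert_getD_add_one_eq_counter, PySem.Dict.getD_counter]
  have hlen0 : (List.replicate amix.length false).length = (amix.map (fun alt => PySem.Str.strip (PySem.Str.lower alt))).length := by simp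
  have hpt0 : InvPt (amix.map (fun alt => PySem.Str.strip (PySem.Str.lower alt))) (List.replicate amix.length false) PySem.Dict.empty := by
    intro idx
    rw [PySem.Dict.getD_empty,
        decide_eq_false (by omega : ¬ ((((amix.map (fun alt => PySem.Str.strip (PySem.Str.lower alt))).take idx).count ((amix.map (fun alt => PySem.Str.strip (PySem.Str.lower alt))).getD idx "") : Int) < 0))]
    simp [List.getD_eq_getElem?_getD, List.getElem?_replicate]
    split <;> rfl
  have hbd0 : InvBd (amix.map (fun alt => PySem.Str.strip (PySem.Str.lower alt))) PySem.Dict.empty := by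
    intro v
    rw [PySem.Dict.getD_empty]
    constructor
    · omega
    · positivity
  obtain ⟨hnorm, hptF⟩ := mainFoldBC (amix.map (fun alt => PySem.Str.strip (PySem.Str.lower alt))) (PySem.Dict.ofList cmap) ((amix.map (fun alt => PySem.Str.strip (PySem.Str.lower alt))).foldl (fun (d : PySem.Dict String Int) x => d.insert x (d.getD x 0 + 1)) PySem.Dict.empty) htot (PySem.List.sorted (PySem.Dict.ofList cmap).keys (fun c => (c.length : Int)) true)
    (List.replicate amix.length false) PySem.Dict.empty [] hlen0 hpt0 hbd0
  have e1 : normalize_alteration_mix amix svm cmap = (PySem.Str.join " " (((((PySem.List.sorted (PySem.Dict.ofList cmap).keys (fun c => (c.length : Int)) true).foldl (fun (st : List Bool × List String) combo => match collectA (amix.map (fun alt => PySem.Str.strip (PySem.Str.lower alt))) st.1 combo with | some (i :: is) => ((i :: is).foldl (fun u j => u.set j true) st.1, st.2 ++ [(PySem.Dict.ofList cmap).getD combo ""]) | _ => st) (List.replicate amix.length false, [])).2 ++ (singlesList amix (PySem.Dict.ofList svm) ((PySem.List.sorted (PySem.Dict.ofList cmap).keys (fun c => (c.length : Int)) true).foldl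 (fun (st : List Bool × List String) combo => match collectA (amix.map (fun alt => PySem.Str.strip (PySem.Str.lower alt))) st.1 combo with | some (i :: is) => ((i :: is).foldl (fun u j => u.set j true) st.1, st.2 ++ [(PySem.Dict.ofList cmap).getD combo ""]) | _ => st) (List.replicate amix.length false, [])).1 (pyEnum (amix.map (fun alt => PySem.Str.strip (PySem.Str.lower alt))) 0))).foldl (fun (acc : PySem.Set String × List String) item => if PySem.Set.contains acc.1 item then acc else (PySem.Set.add acc.1 item, acc.2 ++ [item])) (PySem.Set.empty, [])).2)) :=
    congrArg (fun l : List String => (PySem.Str.join " " ((l.foldl (fun (acc : PySem.Set String × List String) item => if PySem.Set.contains acc.1 item then acc else (PySem.Set.add acc.1 item, acc.2 ++ [item])) (PySem.Set.empty, [])).2)))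
      (singlesA_eq amix (PySem.Dict.ofList svm) (amix.map (fun alt => PySem.Str.strip (PySem.Str.lower alt))) 0 ((PySem.List.sorted (PySem.Dict.ofList cmap).keys (fun c => (c.length : Int)) true).foldl (fun (st : List Bool × List String) combo => match collectA (amix.map (fun alt => PySem.Str.strip (PySem.Str.lower alt))) st.1 combo with | some (i :: is) => ((i :: is).foldl (fun u j => u.set j true) st.1, st.2 ++ [(PySem.Dict.ofList cmap).getD combo ""]) | _ => st) (List.replicate amix.length false, [])) ((PySem.List.sorted (PySem.Dict.ofList cmap).keys (fun c => (c.length : Int)) true).foldl (fun (st : List Bool × List String) combo => match collectA (amix.map (fun alt => PySem.Str.strip (PySem.Str.lower alt))) st.1 combo with | some (i :: is) => ((i :: is).foldl (fun u j => u.set j true) st.1, st.2 ++ [(PySem.Dict.ofList cmap).getD combo ""]) | _ => st) (List.replicate amix.length false, [])).1 (fun j _ => rfl))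
  have hso0 : ∀ v, (PySem.Dict.empty : PySem.Dict String Int).getD v 0 = (((amix.map (fun alt => PySem.Str.strip (PySem.Str.lower alt))).take 0).count v : Int) := by
    intro v
    simp [PySem.Dict.getD_empty]
  have e2 : normalize_alteration_mix_alt amix svm cmap = (PySem.Str.join " " (((((PySem.List.sorted (PySem.Dict.ofList cmap).keys (fun c => (c.length : Int)) true).foldl (fun (st : PySem.Dict String Int × List String) combo => let elems := PySem.Set.ofList combo; if combo ≠ [] ∧ ∀ e ∈ elems, st.1.getD e 0 < ((amix.map (fun alt => PySem.Str.strip (PySem.Str.lower alt))).foldl (fun (d : PySem.Dict String Int) x => d.insert x (d.getD x 0 + 1)) PySem.Dict.empty).getD e 0 then (elems.foldl (fun (c : PySem.Dict String Int) e => c.insert e (c.getD e 0 + 1)) st.1, st.2 ++ [(PySem.Dict.ofList cmap).getD combo ""]) else st) (PySem.Dict.empty, [])).2 ++ (singlesList amix (PySem.Dict.ofList svm) ((PySem.List.sorted (PySem.Dict.ofList cmap).keys (fun c => (c.length : Int)) true).foldl (fun (st : List Bool × List String) combo => match collectA (amix.map (fun alt => PySem.Str.strip (PySem.Str.lower alt)))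 st.1 combo with | some (i :: is) => ((i :: is).foldl (fun u j => u.set j true) st.1, st.2 ++ [(PySem.Dict.ofList cmap).getD combo ""]) | _ => st) (List.replicate amix.length false, [])).1 (pyEnum (amix.map (fun alt => PySem.Str.strip (PySem.Str.lower alt))) 0))).foldl (fun (acc : PySem.Set String × List String) item => if PySem.Set.contains acc.1 item then acc else (PySem.Set.add acc.1 item, acc.2 ++ [item])) (PySem.Set.empty, [])).2)) :=
    congrArg (fun l : List String => (PySem.Str.join " " ((l.foldl (fun (acc : PySem.Set String × List String) item => if PySem.Set.contains acc.1 item then acc else (PySem.Set.add acc.1 item, acc.2 ++ [item])) (PySem.Set.empty, [])).2)))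
      (singlesB_eq amix (amix.map (fun alt => PySem.Str.strip (PySem.Str.lower alt))) (PySem.Dict.ofList svm) ((PySem.List.sorted (PySem.Dict.ofList cmap).keys (fun c => (c.length : Int)) true).foldl (fun (st : List Bool × List String) combo => match collectA (amix.map (fun alt => PySem.Str.strip (PySem.Str.lower alt))) st.1 combo with | some (i :: is) => ((i :: is).foldl (fun u j => u.set j true) st.1, st.2 ++ [(PySem.Dict.ofList cmap).getD combo ""]) | _ => st) (List.replicate amix.length false, [])).1 ((PySem.List.sorted (PySem.Dict.ofList cmap).keys (fun c => (c.length : Int)) true).foldl (fun (st : PySem.Dict String Int × List String) combo => let elems := PySem.Set.ofList combo; if combo ≠ [] ∧ ∀ e ∈ elems, st.1.getD e 0 < ((amix.map (fun alt => PySem.Str.strip (PySem.Str.lower alt))).foldl (fun (d : PySem.Dict String Int) x => d.insert x (d.getD x 0 + 1)) PySem.Dict.empty).getD e 0 then (elems.foldl (fun (c : PySem.Dict String Int) e => c.insert e (c.getD e 0 + 1)) st.1, st.2 ++ [(PySem.Dict.ofList cmap).getD combo ""]) else st) (PySem.Dict.empty, [])).1 hptF (amix.map (fun alt => PySem.Str.strip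 (PySem.Str.lower alt))) 0 rfl PySem.Dict.empty ((PySem.List.sorted (PySem.Dict.ofList cmap).keys (fun c => (c.length : Int)) true).foldl (fun (st : PySem.Dict String Int × List String) combo => let elems := PySem.Set.ofList combo; if combo ≠ [] ∧ ∀ e ∈ elems, st.1.getD e 0 < ((amix.map (fun alt => PySem.Str.strip (PySem.Str.lower alt))).foldl (fun (d : PySem.Dict String Int) x => d.insert x (d.getD x 0 + 1)) PySem.Dict.empty).getD e 0 then (elems.foldl (fun (c : PySem.Dict String Int) e => c.insert e (c.getD e 0 + 1)) st.1, st.2 ++ [(PySem.Dict.ofList cmap).getD combo ""]) else st) (PySem.Dict.empty, [])).2 hso0)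
  have mid : (PySem.Str.join " " (((((PySem.List.sorted (PySem.Dict.ofList cmap).keys (fun c => (c.length : Int)) true).foldl (fun (st : List Bool × List String) combo => match collectA (amix.map (fun alt => PySem.Str.strip (PySem.Str.lower alt))) st.1 combo with | some (i :: is) => ((i :: is).foldl (fun u j => u.set j true) st.1, st.2 ++ [(PySem.Dict.ofList cmap).getD combo ""]) | _ => st) (List.replicate amix.length false, [])).2 ++ (singlesList amix (PySem.Dict.ofList svm) ((PySem.List.sorted (PySem.Dict.ofList cmap).keys (fun c => (c.length : Int)) true).foldl (fun (st : List Bool × List String) combo => match collectA (amix.map (fun alt => PySem.Str.strip (PySem.Str.lower alt))) st.1 combo with | some (i :: is) => ((i :: is).foldl (fun u j => u.set j true) st.1, st.2 ++ [(PySem.Dict.ofList cmap).getD combo ""]) | _ => st) (List.replicate amix.length false, [])).1 (pyEnum (amix.map (fun alt => PySem.Str.strip (PySem.Str.lower alt))) 0))).foldl (fun (acc : PySem.Set String × List String) item => if PySem.Set.contains acc.1 item then acc else (PySem.Set.add acc.1 item, acc.2 ++ [item])) (PySem.Set.empty, [])).2)) = (PySem.Str.join " " (((((PySem.List.sorted (PySem.Dict.ofList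 cmap).keys (fun c => (c.length : Int)) true).foldl (fun (st : PySem.Dict String Int × List String) combo => let elems := PySem.Set.ofList combo; if combo ≠ [] ∧ ∀ e ∈ elems, st.1.getD e 0 < ((amix.map (fun alt => PySem.Str.strip (PySem.Str.lower alt))).foldl (fun (d : PySem.Dict String Int) x => d.insert x (d.getD x 0 + 1)) PySem.Dict.empty).getD e 0 then (elems.foldl (fun (c : PySem.Dict String Int) e => c.insert e (c.getD e 0 + 1)) st.1, st.2 ++ [(PySem.Dict.ofList cmap).getD combo ""]) else st) (PySem.Dict.empty, [])).2 ++ (singlesList amix (PySem.Dict.ofList svm) ((PySem.List.sorted (PySem.Dict.ofList cmap).keys (fun c => (c.length : Int)) true).foldl (fun (st : List Bool × List String) combo => match collectA (amix.map (fun alt => PySem.Str.strip (PySem.Str.lower alt))) st.1 combo with | some (i :: is) => ((i :: is).foldl (fun u j => u.set j true) st.1, st.2 ++ [(PySem.Dict.ofList cmap).getD combo ""]) | _ => st) (List.replicate amix.length false, [])).1 (pyEnum (amix.map (fun alt => PySem.Str.strip (PySem.Str.lower alt))) 0))).foldl (fun (acc : PySem.Set String × List String) item => if PySem.Set.contains acc.1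 item then acc else (PySem.Set.add acc.1 item, acc.2 ++ [item])) (PySem.Set.empty, [])).2)) := by
    rw [hnorm]
  exact e1.trans (mid.trans e2.symm)
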